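-- pv_equiv track=rewrite | github.com/zeun0725/Algorithm_Programmers | monthly_code_1/monthly_code_1_6.py | solution
-- ===== SOURCE A (Python) =====
-- def solution(a):
--     answer = 0
--
--     for _idx, _a in enumerate(a):
--         l_min = None
--         r_min = None
--         penalty = False
--         if _idx != 0:
--             l_min = min(a[:_idx])
--             if l_min < _a:
--                 penalty = True
--         if _idx != len(a) - 1:
--             r_min = min(a[_idx+1:])
--             if r_min < _a and penalty:
--                 continue
--         answer += 1
--     return answer
-- ===== SOURCE B (Python) =====
-- def solution(a):
--     n = len(a)
--     if n <= 2:
--         return n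
--     mid = a[1:][:-1]
--     pre = []
--     m = a[0]
--     for x in mid:
--         pre.append(m)
--         m = x if x < m else m
--     suf = []
--     m = a[-1]
--     for x in reversed(mid):
--         suf.append(m)
--         m = x if x < m else m
--     suf.reverse()
--     ans = 2
--     for x, p, s in zip(mid, pre, suf):
--         if not (p < x and s < x):
--             ans += 1
--     return ans
-- ===== Notes on version B (the rewrite author's own statement) =====
-- stated objective: faster
-- what changed: Replaced the per-element min() over the left and right slices (O(n^2)) by two linear running-minimum scans (prefix and suffix minima) and one O(1) test per middle element, with the first and last element always counted.
import Mathlib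
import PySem

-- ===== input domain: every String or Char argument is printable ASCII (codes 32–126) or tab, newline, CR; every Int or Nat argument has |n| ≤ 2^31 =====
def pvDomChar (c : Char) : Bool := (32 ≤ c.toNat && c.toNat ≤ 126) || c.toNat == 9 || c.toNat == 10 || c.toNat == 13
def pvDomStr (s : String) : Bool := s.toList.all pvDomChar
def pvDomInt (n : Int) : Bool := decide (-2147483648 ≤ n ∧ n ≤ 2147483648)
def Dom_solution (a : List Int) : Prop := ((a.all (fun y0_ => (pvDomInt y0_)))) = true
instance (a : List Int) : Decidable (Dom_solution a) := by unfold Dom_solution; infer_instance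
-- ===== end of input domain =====

-- B replaces A's per-element slice-min (quadratic) by two linear running-minimum scans; objective: faster.

-- ===== PORT A =====
-- per-element loop body of A: min over the left slice a[:idx] and the right slice a[idx+1:]
def stepA (a : List Int) (answer : Int) (p : Int × Int) : Int :=
  let idx := p.1
  let x := p.2
  let penalty : Bool :=
    if idx ≠ 0 then
      match PySem.List.min? (PySem.List.slice a none (some idx)) (fun y => y) with
      | some l => decide (l < x)
      | none => false          -- unreachable: idx ≠ 0 makes the slice nonempty
    else false
  if idx ≠ (a.length : Int) - 1 then
    match PySem.List.min? (PySem.List.slice a (some (idx + 1)) none) (fun y => y) with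
    | some r => if decide (r < x) && penalty then answer else answer + 1
    | none => answer + 1       -- unreachable: idx ≠ len-1 makes the slice nonempty
  else answer + 1

def solution (a : List Int) : Int :=
  (PySem.List.enumerate a 0).foldl (stepA a) 0

-- ===== PORT B =====
-- running-minimum scan: element j of the result is the minimum of the seed and the first j inputs
def scanMin (m : Int) : List Int → List Int
  | [] => []
  | x :: xs => m :: scanMin (if x < m then x else m) xs

def solution_alt (a : List Int) : Int :=
  let n := a.length
  if n ≤ 2 then (n : Int)
  else
    let mid := PySem.List.slice (PySem.List.slice a (some 1) none) none (some (-1))  -- a[1:][:-1]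
    let pre := scanMin (a.headD 0) mid
    let suf := (scanMin (a.getLastD 0) mid.reverse).reverse
    (mid.zip (pre.zip suf)).foldl (fun ans t =>
      if decide (t.2.1 < t.1) && decide (t.2.2 < t.1) then ans else ans + 1) 2

-- ===== PRECONDITION & SPEC =====
def Spec_solution (a : List Int) (out : Int) : Prop := out = solution_alt a
instance (a : List Int) (out : Int) : Decidable (Spec_solution a out) := by unfold Spec_solution; infer_instance

-- ===== CLAIM (what is proved, stated in full; the proofs are below) =====
def Claim_equal_solution : Prop := ∀ (a : List Int), Dom_solution a → Spec_solution a (solution a)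

-- ===== LEMMAS AND PROOFS =====

-- per-element contribution of A's loop (0 = skipped by `continue`, 1 = counted)
def gA (a : List Int) (p : Int × Int) : Int :=
  if p.1 ≠ (a.length : Int) - 1 then
    match PySem.List.min? (PySem.List.slice a (some (p.1 + 1)) none) (fun y => y) with
    | some r =>
      if decide (r < p.2) &&
          (if p.1 ≠ 0 then
            match PySem.List.min? (PySem.List.slice a none (some p.1)) (fun y => y) with
            | some l => decide (l < p.2)
            | none => false
          else false) then 0 else 1
    | none => 1
  else 1

-- per-element contribution of B's counting loop
def gB (t : Int × Int × Int) : Int :=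
  if decide (t.2.1 < t.1) && decide (t.2.2 < t.1) then 0 else 1

lemma stepA_eq (a : List Int) (ans : Int) (p : Int × Int) :
    stepA a ans p = ans + gA a p := by
  simp only [stepA, gA]
  by_cases h : p.1 ≠ (a.length : Int) - 1
  · rw [if_pos h, if_pos h]
    split
    · split_ifs <;> omega
    · omega
  · rw [if_neg h, if_neg h]

lemma solution_eq_sum (a : List Int) :
    solution a = ((PySem.List.enumerate a 0).map (gA a)).sum := by
  unfold solution
  rw [show stepA a = (fun ans p => ans + gA a p) from funext fun ans => funext fun p => stepA_eq a ans p]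
  rw [PySem.List.foldl_add]
  omega

lemma stepB_eq (ans : Int) (t : Int × Int × Int) :
    (if decide (t.2.1 < t.1) && decide (t.2.2 < t.1) then ans else ans + 1) = ans + gB t := by
  simp only [gB]; split <;> omega

lemma foldB_eq (l : List (Int × Int × Int)) (ans : Int) :
    l.foldl (fun ans t => if decide (t.2.1 < t.1) && decide (t.2.2 < t.1) then ans else ans + 1) ans
      = ans + (l.map gB).sum := by
  rw [show (fun (ans : Int) (t : Int × Int × Int) =>
        if decide (t.2.1 < t.1) && decide (t.2.2 < t.1) then ans else ans + 1)
      = (fun ans t => ans + gB t) from funext fun ans => funext fun t => stepB_eq ans t]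
  rw [PySem.List.foldl_add]

lemma scanMin_length (l : List Int) : ∀ m, (scanMin m l).length = l.length := by
  induction l with
  | nil => intro m; simp [scanMin]
  | cons x xs ih => intro m; simp [scanMin, ih]

lemma minStep_eq (m x : Int) : (if x < m then x else m) = min m x := by
  rw [min_def]; split_ifs <;> omega

lemma scanMin_getElem : ∀ (l : List Int) (m : Int) (k : Nat) (hk : k < l.length),
    (scanMin m l)[k]'(by rw [scanMin_length]; exact hk) = (l.take k).foldl min m := by
  intro l
  induction l with
  | nil => intro m k hk; simp at hk
  | cons x xs ih =>
    intro m k hk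
    cases k with
    | zero => simp [scanMin]
    | succ k =>
      have hk' : k < xs.length := by simpa using hk
      simpa [scanMin, minStep_eq] using ih (if x < m then x else m) k hk'

lemma foldl_min_pull : ∀ (l : List Int) (x c : Int),
    l.foldl min (min x c) = min (l.foldl min x) c := by
  intro l
  induction l with
  | nil => intro x c; simp
  | cons y t ih =>
    intro x c
    simp only [List.foldl_cons]
    rw [min_right_comm, ih]

lemma foldl_min_reverse : ∀ (l : List Int) (x : Int),
    l.reverse.foldl min x = l.foldl min x := by
  intro l
  induction l with
  | nil => intro x; simp
  | cons y t ih =>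
    intro x
    simp only [List.reverse_cons, List.foldl_append, List.foldl_cons, List.foldl_nil]
    rw [ih, ← foldl_min_pull]

lemma min?_append_singleton (l : List Int) (e : Int) :
    PySem.List.min? (l ++ [e]) (fun y => y) = some (l.foldl min e) := by
  cases l with
  | nil => simpa using PySem.List.min?_id_cons e []
  | cons c t =>
    rw [List.cons_append, PySem.List.min?_id_cons]
    congr 1
    rw [List.foldl_append]
    simp only [List.foldl_cons, List.foldl_nil]
    rw [← foldl_min_pull, min_comm]

lemma gA_first (x0 xl : Int) (mid : List Int) :
    gA (x0 :: (mid ++ [xl])) (0, x0) = 1 := by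
  simp only [gA]
  rw [if_pos (by simp; omega : (0:Int) ≠ ((x0 :: (mid ++ [xl])).length : Int) - 1)]
  rw [PySem.List.slice_from (x0 :: (mid ++ [xl])) (by omega : (0:Int) ≤ 0 + 1)]
  have h1 : ((0:Int) + 1).toNat = 1 := by omega
  rw [h1]
  simp only [List.drop_succ_cons, List.drop_zero]
  rw [min?_append_singleton]
  simp

lemma gA_last (x0 xl : Int) (mid : List Int) :
    gA (x0 :: (mid ++ [xl])) (1 + (mid.length : Int), xl) = 1 := by
  simp only [gA]
  rw [if_neg (by simp; omega : ¬(1 + (mid.length : Int) ≠ ((x0 :: (mid ++ [xl])).length : Int) - 1))]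

lemma middle_maps (x0 xl : Int) (mid : List Int) :
    (PySem.List.enumerate mid 1).map (gA (x0 :: (mid ++ [xl]))) =
    (mid.zip ((scanMin x0 mid).zip ((scanMin xl mid.reverse).reverse))).map gB := by
  apply List.ext_getElem
  · simp [PySem.List.length_enumerate, scanMin_length]
  · intro k h1 h2
    have hk : k < mid.length := by
      simpa [PySem.List.length_enumerate] using h1
    simp only [List.getElem_map]
    rw [PySem.List.getElem_enumerate]
    rw [List.getElem_zip, List.getElem_zip]
    -- the left minimum: min(a[:1+k]) = pre[k]
    have hpre : (scanMin x0 mid)[k]'(by rw [scanMin_length]; exact hk)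
        = (mid.take k).foldl min x0 := scanMin_getElem mid x0 k hk
    -- the right minimum: min(a[2+k:]) = suf[k]
    have hsuf : ((scanMin xl mid.reverse).reverse)[k]'(by simp [scanMin_length]; exact hk)
        = (mid.drop (k + 1)).foldl min xl := by
      rw [List.getElem_reverse]
      have hlen : (scanMin xl mid.reverse).length = mid.length := by
        rw [scanMin_length]; simp
      have hj : (scanMin xl mid.reverse).length - 1 - k < mid.reverse.length := by
        simp [hlen]; omega
      rw [scanMin_getElem mid.reverse xl _ hj]
      rw [List.take_reverse]
      have : mid.length - ((scanMin xl mid.reverse).length - 1 - k) = k + 1 := by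
        simp [hlen]; omega
      rw [hlen] at this ⊢
      rw [this, foldl_min_reverse]
    -- evaluate gA at the middle index 1+k
    simp only [gA, gB]
    rw [if_pos (by simp; omega : (1 + (k:Int)) ≠ (((x0 :: (mid ++ [xl])).length : Int) - 1))]
    rw [PySem.List.slice_from (x0 :: (mid ++ [xl])) (by omega : (0:Int) ≤ 1 + (k:Int) + 1)]
    have h2k : ((1:Int) + (k:Int) + 1).toNat = k + 2 := by omega
    rw [h2k]
    have hdrop : (x0 :: (mid ++ [xl])).drop (k + 2) = mid.drop (k + 1) ++ [xl] := by
      have : k + 2 = (k + 1) + 1 := rfl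
      rw [this, List.drop_succ_cons, List.drop_append_of_le_length (by omega)]
    rw [hdrop, min?_append_singleton]
    rw [if_pos (by omega : (1 + (k:Int)) ≠ 0)]
    rw [PySem.List.slice_to (x0 :: (mid ++ [xl])) (by omega : (0:Int) ≤ 1 + (k:Int))]
    have h1k : ((1:Int) + (k:Int)).toNat = k + 1 := by omega
    rw [h1k]
    have htake : (x0 :: (mid ++ [xl])).take (k + 1) = x0 :: mid.take k := by
      rw [List.take_succ_cons, List.take_append_of_le_length (by omega)]
    rw [htake, PySem.List.min?_id_cons]
    rw [hpre, hsuf]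
    rw [Bool.and_comm]

-- ===== VERDICT (by name: the statement is the Claim_ definition above) =====
theorem solution_spec : Claim_equal_solution := by
  unfold Claim_equal_solution
  intro a _
  unfold Spec_solution
  by_cases hsmall : a.length ≤ 2
  · rcases a with _ | ⟨x, a⟩
    · simp [solution, solution_alt, PySem.List.enumerate_nil]
    · rcases a with _ | ⟨y, a⟩
      · simp [solution, solution_alt, stepA, PySem.List.enumerate_cons, PySem.List.enumerate_nil]
      · rcases a with _ | ⟨z, a⟩
        · simp [solution, solution_alt, stepA, PySem.List.enumerate_cons, PySem.List.enumerate_nil,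
            PySem.List.slice, PySem.List.min?]
        · simp at hsmall
  · rcases a with _ | ⟨x0, rest⟩
    · simp at hsmall
    · rcases rest.eq_nil_or_concat with hnil | ⟨mid, xl, hc⟩
      · subst hnil; simp at hsmall
      · rw [List.concat_eq_append] at hc
        subst hc
        rw [solution_eq_sum]
        rw [PySem.List.enumerate_cons, PySem.List.enumerate_append]
        simp only [zero_add]
        simp only [List.map_cons, List.map_append, List.sum_cons, List.sum_append]
        rw [gA_first]
        have hone : PySem.List.enumerate [xl] (1 + (mid.length : Int)) = [(1 + (mid.length : Int), xl)] := by
          simp [PySem.List.enumerate_cons, PySem.List.enumerate_nil]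
        rw [hone]
        simp only [List.map_cons, List.map_nil, List.sum_cons, List.sum_nil]
        rw [gA_last]
        rw [middle_maps]
        -- now the B side
        unfold solution_alt
        rw [if_neg (by simp at hsmall ⊢; omega)]
        rw [PySem.List.slice_from_one, PySem.List.slice_to_neg_one]
        simp only [List.tail_cons, List.dropLast_concat]
        have hh : (x0 :: (mid ++ [xl])).headD 0 = x0 := rfl
        have hl : (x0 :: (mid ++ [xl])).getLastD 0 = xl := by
          rw [show x0 :: (mid ++ [xl]) = (x0 :: mid) ++ [xl] by simp]
          rw [List.getLastD_concat]
        rw [hh, hl, foldB_eq]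
        omega
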